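-- pv_equiv track=rewrite | github.com/ram677/gfg_pod | string_stack.py | stringStack
-- ===== SOURCE A (Python) =====
-- import collections
-- import bisect
--
-- def stringStack(pat: str, tar: str) -> bool:
--
--     n, m = len(pat), len(tar)
--
--     if n < m:
--         return False
--
--     # Precompute positions of each character, separated by index parity.
--     # This allows for efficient lookups.
--     # positions maps (character, parity) to a sorted list of indices.
--     positions = collections.defaultdict(list)
--     for i, char in enumerate(pat):
--         positions[(char, i % 2)].append(i)
--
--     # The parity of the index of the first character of the subsequence (`i_1`) must
--     # match the parity of the total number of "extra" characters (`n - m`).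
--     start_parity = (n - m) % 2
--
--     # Greedily search for the earliest valid subsequence.
--     current_pat_idx = -1
--     current_parity = start_parity
--
--     for char_in_tar in tar:
--         # The key to look up in our precomputed map.
--         key = (char_in_tar, current_parity)
--
--         # If a character with the required parity doesn't exist at all, we fail.
--         if key not in positions:
--             return False
--
--         idx_list = positions[key]
--
--         # Find the smallest index in `idx_list` strictly greater than `current_pat_idx`.
--         # `bisect.bisect_right` efficiently finds the insertion point, which corresponds
--         # to the index of the first element larger than `current_pat_idx`.
--         insertion_point = bisect.bisect_right(idx_list, current_pat_idx)
--
--         # If the insertion point is at the end of the list, no valid next index exists.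
--         if insertion_point == len(idx_list):
--             return False
--
--         # We found the next character in our subsequence. Update the last used index.
--         current_pat_idx = idx_list[insertion_point]
--
--         # For the next character in `tar`, the required index parity must alternate.
--         current_parity = 1 - current_parity
--
--     # If we successfully found a valid index for every character in `tar`, it's possible.
--     return True
-- ===== SOURCE B (Python) =====
-- def stringStack(pat: str, tar: str) -> bool:
--     # Single forward two-pointer scan: no position index, no bisect.
--     n, m = len(pat), len(tar)
--     if n < m:
--         return False
--     parity = (n - m) % 2
--     j = 0
--     for i, ch in enumerate(pat):
--         if j < m and ch == tar[j] and i % 2 == parity: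
--             j += 1
--             parity = 1 - parity
--     return j == m
-- ===== Notes on version B (the rewrite author's own statement) =====
-- stated objective: faster
-- what changed: Replaces A's precomputed (char, index-parity) -> sorted index lists with bisect lookups per target character by a single forward two-pointer scan over pat that consumes tar while alternating the required index parity.
import Mathlib
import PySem

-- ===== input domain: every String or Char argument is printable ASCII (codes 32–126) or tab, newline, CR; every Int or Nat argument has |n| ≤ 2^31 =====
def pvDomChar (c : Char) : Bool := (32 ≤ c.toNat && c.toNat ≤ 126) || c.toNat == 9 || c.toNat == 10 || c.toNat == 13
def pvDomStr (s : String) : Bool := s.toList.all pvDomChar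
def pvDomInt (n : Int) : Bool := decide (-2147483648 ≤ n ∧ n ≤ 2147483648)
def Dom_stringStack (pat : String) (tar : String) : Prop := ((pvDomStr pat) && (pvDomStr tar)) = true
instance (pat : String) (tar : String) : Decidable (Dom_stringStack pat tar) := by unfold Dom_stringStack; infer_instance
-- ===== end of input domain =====

-- B replaces A's (char, parity) position index + bisect lookups by a single forward
-- two-pointer scan over pat (objective: faster).

-- ===== PORT A =====
-- positions: defaultdict mapping (char, index parity) to the list of indices, in order.
def pvBuildPositions (patL : List Char) : PySem.Dict (Char × Int) (List Int) :=
  (PySem.List.enumerate patL).foldl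
    (fun d ic =>
      d.insert (ic.2, PySem.Int.mod ic.1 2) (d.getD (ic.2, PySem.Int.mod ic.1 2) [] ++ [ic.1]))
    PySem.Dict.empty

-- the 'for char_in_tar in tar' loop of A
def pvGoA (positions : PySem.Dict (Char × Int) (List Int)) :
    List Char → Int → Int → Bool
  | [], _, _ => true
  | c :: cs, cur, parity =>
    match positions.get? (c, parity) with
    | none => false
    | some lst =>
      let ip := PySem.List.bisectRight lst cur
      if ip = lst.length then false
      else
        match PySem.List.pyGet? lst (ip : Int) with
        | none => false   -- unreachable: ip < lst.length
        | some nxt => pvGoA positions cs nxt (1 - parity)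

def stringStack (pat : String) (tar : String) : Bool :=
  let n : Int := PySem.Str.len pat
  let m : Int := PySem.Str.len tar
  if n < m then false
  else
    pvGoA (pvBuildPositions pat.toList) tar.toList (-1) (PySem.Int.mod (n - m) 2)

-- ===== PORT B =====
-- one step of B's loop body over the state (j, parity)
def pvStepB (tarL : List Char) (st : Int × Int) (ic : Int × Char) : Int × Int :=
  if st.1 < (tarL.length : Int) then
    match PySem.List.pyGet? tarL st.1 with
    | some c =>
      if ic.2 = c ∧ PySem.Int.mod ic.1 2 = st.2 then (st.1 + 1, 1 - st.2) else st
    | none => st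
  else st

def stringStack_alt (pat : String) (tar : String) : Bool :=
  let n : Int := PySem.Str.len pat
  let m : Int := PySem.Str.len tar
  if n < m then false
  else
    let st := (PySem.List.enumerate pat.toList).foldl (pvStepB tar.toList)
      (0, PySem.Int.mod (n - m) 2)
    decide (st.1 = m)

-- ===== PRECONDITION & SPEC =====
def Spec_stringStack (pat : String) (tar : String) (out : Bool) : Prop := out = stringStack_alt pat tar
instance (pat : String) (tar : String) (out : Bool) : Decidable (Spec_stringStack pat tar out) := by unfold Spec_stringStack; infer_instance

-- ===== CLAIM (what is proved, stated in full; the proofs are below) =====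
def Claim_equal_stringStack : Prop := ∀ (pat : String) (tar : String), Dom_stringStack pat tar → Spec_stringStack pat tar (stringStack pat tar)

-- ===== LEMMAS AND PROOFS =====

-- common greedy reference: scan the (index, char) pairs left to right, consuming tar
def pvGreedy : List (Int × Char) → List Char → Int → Bool
  | _, [], _ => true
  | [], _ :: _, _ => false
  | ic :: rest, c :: cs, parity =>
    if ic.2 = c ∧ PySem.Int.mod ic.1 2 = parity then pvGreedy rest cs (1 - parity)
    else pvGreedy rest (c :: cs) parity

theorem pvGreedy_nil (l : List (Int × Char)) (p : Int) : pvGreedy l [] p = true := by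
  cases l <;> rfl

-- B's fold computes the greedy scan
theorem pvFoldB (tarL : List Char) (l : List (Int × Char)) :
    ∀ (j : Nat) (parity : Int), j ≤ tarL.length →
      decide ((l.foldl (pvStepB tarL) ((j : Int), parity)).1 = (tarL.length : Int))
        = pvGreedy l (tarL.drop j) parity := by
  induction l with
  | nil =>
    intro j parity hj
    simp only [List.foldl_nil]
    rcases Nat.lt_or_ge j tarL.length with h | h
    · have hne : tarL.drop j ≠ [] := by
        simp only [ne_eq, List.drop_eq_nil_iff]; omega
      rcases hx : tarL.drop j with _ | ⟨c, cs⟩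
      · exact absurd hx hne
      · simp only [pvGreedy]
        simp only [decide_eq_false_iff_not]
        omega
    · have : j = tarL.length := le_antisymm hj h
      subst this
      simp [List.drop_length, pvGreedy_nil]
  | cons ic l' ih =>
    intro j parity hj
    rcases Nat.lt_or_ge j tarL.length with h | h
    · have hdrop : tarL.drop j = tarL[j] :: tarL.drop (j + 1) :=
        (List.getElem_cons_drop h).symm
      rw [hdrop]
      simp only [List.foldl_cons, pvStepB]
      rw [if_pos (by exact_mod_cast h)]
      rw [PySem.List.pyGet?_natCast, List.getElem?_eq_getElem h]
      by_cases hc : ic.2 = tarL[j] ∧ PySem.Int.mod ic.1 2 = parity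
      · simp only [if_pos hc]
        have hcast : ((j : Int) + 1) = ((j + 1 : Nat) : Int) := by push_cast; ring
        rw [hcast, ih (j + 1) (1 - parity) (by omega)]
        simp only [pvGreedy]
        rw [if_pos hc]
      · simp only [if_neg hc]
        rw [ih j parity hj]
        rw [hdrop]
        simp only [pvGreedy]
        rw [if_neg hc]
    · have hje : j = tarL.length := le_antisymm hj h
      subst hje
      simp only [List.foldl_cons, pvStepB]
      rw [if_neg (by omega)]
      rw [ih tarL.length parity le_rfl]
      simp [List.drop_length, pvGreedy_nil]

-- key of an enumerate entry, as A's dict uses it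
def pvKey (ic : Int × Char) : Char × Int := (ic.2, PySem.Int.mod ic.1 2)

-- occurrence list for a key: the indices A's dict stores under that key
def pvOcc (patL : List Char) (k : Char × Int) : List Int :=
  ((PySem.List.enumerate patL).filter (fun ic => pvKey ic = k)).map Prod.fst

theorem pvBuild_get?_gen (l : List (Int × Char)) :
    ∀ (d : PySem.Dict (Char × Int) (List Int)) (k : Char × Int),
      (l.foldl
        (fun d ic =>
          d.insert (ic.2, PySem.Int.mod ic.1 2) (d.getD (ic.2, PySem.Int.mod ic.1 2) [] ++ [ic.1]))
        d).get? k =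
      (if (l.filter (fun ic => pvKey ic = k)).map Prod.fst = [] then d.get? k
       else some (d.getD k [] ++ (l.filter (fun ic => pvKey ic = k)).map Prod.fst)) := by
  induction l with
  | nil => intro d k; simp
  | cons ic l' ih =>
    intro d k
    by_cases hk : pvKey ic = k
    · have hk' : (ic.2, PySem.Int.mod ic.1 2) = k := hk
      simp only [List.foldl_cons, List.filter_cons, hk, decide_true, if_true]
      rw [ih]
      rw [hk']
      simp only [List.map_cons]
      rw [PySem.Dict.get?_insert, if_pos rfl, PySem.Dict.getD_insert, if_pos rfl]
      by_cases he : (l'.filter (fun ic => pvKey ic = k)).map Prod.fst = []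
      · simp [he]
      · simp [he]
    · simp only [List.foldl_cons, List.filter_cons, hk, decide_false]
      rw [ih]
      have h1 : (d.insert (ic.2, PySem.Int.mod ic.1 2)
          (d.getD (ic.2, PySem.Int.mod ic.1 2) [] ++ [ic.1])).get? k = d.get? k := by
        rw [PySem.Dict.get?_insert, if_neg (fun hh => hk (by simpa [pvKey] using hh.symm))]
      have h2 : (d.insert (ic.2, PySem.Int.mod ic.1 2)
          (d.getD (ic.2, PySem.Int.mod ic.1 2) [] ++ [ic.1])).getD k [] = d.getD k [] := by
        rw [PySem.Dict.getD_insert, if_neg (fun hh => hk (by simpa [pvKey] using hh.symm))]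
      rw [h1, h2]
      simp

theorem pvBuild_get? (patL : List Char) (k : Char × Int) :
    (pvBuildPositions patL).get? k =
      (if pvOcc patL k = [] then none else some (pvOcc patL k)) := by
  unfold pvBuildPositions pvOcc
  rw [pvBuild_get?_gen]
  split_ifs <;> simp [PySem.Dict.empty, PySem.Dict.get?, PySem.Dict.getD]

theorem pvOcc_sorted (patL : List Char) (k : Char × Int) :
    (pvOcc patL k).Pairwise (· < ·) := by
  unfold pvOcc
  exact ((PySem.List.pairwise_lt_enumerate patL 0).filter _).map _ (fun a b h => h)

-- greedy via first match, on an index-strictly-increasing pair list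
theorem pvGreedy_find (c : Char) (cs : List Char) (parity : Int) :
    ∀ (l : List (Int × Char)), l.Pairwise (fun p q => p.1 < q.1) →
      pvGreedy l (c :: cs) parity =
        (match l.find? (fun ic => decide (ic.2 = c ∧ PySem.Int.mod ic.1 2 = parity)) with
         | none => false
         | some ic => pvGreedy (l.filter (fun jc => ic.1 < jc.1)) cs (1 - parity)) := by
  intro l
  induction l with
  | nil => intro _; rfl
  | cons ic l' ih =>
    intro hp
    by_cases hc : ic.2 = c ∧ PySem.Int.mod ic.1 2 = parity
    · simp only [pvGreedy, if_pos hc, List.find?_cons, decide_eq_true hc]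
      have hall : ∀ jc ∈ l', ic.1 < jc.1 := fun jc hjc => (List.pairwise_cons.mp hp).1 jc hjc
      have hfe : (ic :: l').filter (fun jc => decide (ic.1 < jc.1)) = l' := by
        simp only [List.filter_cons]
        rw [if_neg (by simp)]
        exact List.filter_eq_self.mpr (fun a ha => by simpa using hall a ha)
      rw [hfe]
    · simp only [pvGreedy, if_neg hc, List.find?_cons, decide_eq_false hc]
      rw [ih (List.pairwise_cons.mp hp).2]
      rcases hf : l'.find? (fun ic => decide (ic.2 = c ∧ PySem.Int.mod ic.1 2 = parity)) with _ | jc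
      · rw [hf]
      · have hjmem : jc ∈ l' := List.mem_of_find?_eq_some hf
        have hij : ic.1 < jc.1 := (List.pairwise_cons.mp hp).1 jc hjmem
        rw [hf]
        simp only [List.filter_cons]
        rw [if_neg (by simp; omega)]

theorem pvFind?_congr {α : Type} (p q : α → Bool) (l : List α) (h : ∀ a, p a = q a) :
    l.find? p = l.find? q := by
  induction l with
  | nil => rfl
  | cons x xs ih => simp only [List.find?_cons, h x]; split <;> [rfl; exact ih]

-- A's loop equals the greedy scan over entries with index > cur
theorem pvGoA_greedy (patL : List Char) :
    ∀ (t : List Char) (cur parity : Int),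
      pvGoA (pvBuildPositions patL) t cur parity =
        pvGreedy ((PySem.List.enumerate patL).filter (fun ic => cur < ic.1)) t parity := by
  intro t
  induction t with
  | nil => intro cur parity; simp [pvGoA, pvGreedy_nil]
  | cons c cs ih =>
    intro cur parity
    rw [pvGreedy_find c cs parity _ ((PySem.List.pairwise_lt_enumerate patL 0).filter _)]
    rw [List.find?_filter]
    have hfind : ((PySem.List.enumerate patL).find?
          (fun a => decide (decide (cur < a.1) = true ∧
            decide (a.2 = c ∧ PySem.Int.mod a.1 2 = parity) = true))).map Prod.fst
        = (pvOcc patL (c, parity)).find? (fun x => decide (cur < x)) := by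
      unfold pvOcc
      rw [List.find?_map, List.find?_filter]
      exact congrArg (Option.map Prod.fst) (pvFind?_congr _ _ _ (fun a => by
        by_cases h1 : cur < a.1 <;> by_cases h2 : a.2 = c ∧ PySem.Int.mod a.1 2 = parity <;>
          simp [pvKey, h1, h2, Prod.ext_iff, Function.comp]))
    simp only [pvGoA]
    rw [pvBuild_get? patL (c, parity)]
    by_cases hocc : pvOcc patL (c, parity) = []
    · rw [if_pos hocc]
      rcases hf : (PySem.List.enumerate patL).find?
          (fun a => decide (decide (cur < a.1) = true ∧
            decide (a.2 = c ∧ PySem.Int.mod a.1 2 = parity) = true)) with _ | ic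
      · rw [hf]
      · exfalso
        have hx := hfind
        rw [hf, hocc] at hx
        simp at hx
    · rw [if_neg hocc]
      have hsorted := pvOcc_sorted patL (c, parity)
      have hspec := PySem.List.bisectRight_spec (pvOcc patL (c, parity)) cur
        (hsorted.imp le_of_lt)
      set occ := pvOcc patL (c, parity) with hocceq
      set ip := PySem.List.bisectRight occ cur with hip
      have hend' := hip
      by_cases hend : ip = occ.length
      · rw [hend] at hend'
        simp only [if_pos hend'.symm]
        rcases hf : (PySem.List.enumerate patL).find?
            (fun a => decide (decide (cur < a.1) = true ∧
              decide (a.2 = c ∧ PySem.Int.mod a.1 2 = parity) = true)) with _ | ic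
        · rw [hf]
        · exfalso
          have hmem : ic.1 ∈ occ ∧ cur < ic.1 := by
            have h1 := List.find?_some hf
            have h2 := List.mem_of_find?_eq_some hf
            simp only [decide_eq_true_eq] at h1
            refine ⟨?_, h1.1⟩
            rw [hocceq]
            unfold pvOcc
            exact List.mem_map_of_mem (List.mem_filter.mpr ⟨h2, by
              simp only [pvKey, Prod.ext_iff, decide_eq_true_eq]; tauto⟩)
          rcases List.getElem_of_mem hmem.1 with ⟨j, hj, hje⟩
          have hle := hspec.2.1 j hj (by omega)
          rw [hje] at hle
          omega
      · have hne : ¬ PySem.List.bisectRight occ cur = occ.length := fun hh => hend (hip ▸ hh)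
        simp only [if_neg hne]
        have hiplt : ip < occ.length := lt_of_le_of_ne (hspec.1) hend
        rw [show PySem.List.bisectRight occ cur = ip from hip.symm]
        rw [PySem.List.pyGet?_natCast, List.getElem?_eq_getElem hiplt]
        have hfound : occ.find? (fun x => decide (cur < x)) = some occ[ip] := by
          rw [List.find?_eq_some_iff_getElem]
          exact ⟨by simp [hspec.2.2 ip hiplt le_rfl], ip, hiplt, rfl,
            fun j hj => by have h := hspec.2.1 j (by omega) hj; simp; omega⟩
        rcases hf : (PySem.List.enumerate patL).find?
            (fun a => decide (decide (cur < a.1) = true ∧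
              decide (a.2 = c ∧ PySem.Int.mod a.1 2 = parity) = true)) with _ | ic
        · exfalso
          have hx := hfind; rw [hf, hfound] at hx; simp at hx
        · have hic1 : ic.1 = occ[ip] := by
            have hx := hfind; rw [hf, hfound] at hx; simpa using hx
          rw [hf]
          simp only [ih occ[ip] (1 - parity)]
          rw [← hic1]
          rw [List.filter_filter]
          have h1 := List.find?_some hf
          simp only [decide_eq_true_eq] at h1
          refine congrArg (fun l => pvGreedy l cs (1 - parity)) (List.filter_congr ?_)
          intro a _
          by_cases h : ic.1 < a.1
          · have hca : cur < a.1 := by have := h1.1; omega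
            simp [h, hca]
          · simp [h]

-- ===== VERDICT (by name: the statement is the Claim_ definition above) =====
theorem stringStack_spec : Claim_equal_stringStack := by
  intro pat tar _
  unfold Spec_stringStack stringStack stringStack_alt
  simp only [PySem.Str.len_eq]
  by_cases hnm : (pat.toList.length : Int) < (tar.toList.length : Int)
  · rw [if_pos hnm, if_pos hnm]
  · rw [if_neg hnm, if_neg hnm]
    rw [pvGoA_greedy]
    have hfe : (PySem.List.enumerate pat.toList).filter (fun ic => (-1 : Int) < ic.1)
        = PySem.List.enumerate pat.toList := by
      apply List.filter_eq_self.mpr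
      intro a ha
      rcases (PySem.List.mem_enumerate_iff _ _ _).mp ha with ⟨k, hk, hae⟩
      subst hae
      simp
      omega
    rw [hfe]
    have hb := pvFoldB tar.toList (PySem.List.enumerate pat.toList) 0
      (PySem.Int.mod ((pat.toList.length : Int) - (tar.toList.length : Int)) 2) (Nat.zero_le _)
    simp only [Nat.cast_zero, List.drop_zero] at hb
    rw [← hb]
    rfl
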